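-- pv_equiv track=rewrite | github.com/mohoshakeri/ExcelByPython | Excel.py | _excel_columns
-- ===== SOURCE A (Python) =====
-- from string import ascii_uppercase
--
-- def _excel_columns(start='A'):
--     """Internal generator
--
--     Generate excel column: [A, B ... AA, AB ... XFE, XFD]
--     """
--     break_check = False
--     start_check = False
--     alphabet = list(ascii_uppercase)
--     start_len = len(start)
--     if start_len == 1:
--         for item in alphabet:
--             if start_check is False and start == item: start_check = True
--             if start_check: yield item
--     if start_len == 1 or start_len == 2:
--         for item_1 in alphabet:
--             for item_2 in alphabet:
--                 if start_check is False and item_1 + item_2 == start: start_check = True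
--                 if start_check: yield item_1 + item_2
--     for item_1 in alphabet:
--         if break_check:
--             break
--         for item_2 in alphabet:
--             if break_check:
--                 break
--             for item_3 in alphabet:
--                 if (item_1 + item_2 + item_3) == "XFE":
--                     break_check = True
--                     break
--                 if start_check is False and item_1 + item_2 + item_3 == start: start_check = True
--                 if start_check: yield item_1 + item_2 + item_3
-- ===== SOURCE B (Python) =====
-- from string import ascii_uppercase
--
-- def _col_index(s):
--     """1-based column number of a valid column name, else None."""
--     if not 1 <= len(s) <= 3:
--         return None
--     n = 0
--     for c in s:
--         if c not in ascii_uppercase: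
--             return None
--         n = n * 26 + (ord(c) - 64)
--     return n
--
-- def _col_label(n):
--     """Column name of the 1-based column number n (bijective base 26)."""
--     if n <= 0:
--         return ''
--     q, r = divmod(n - 1, 26)
--     return _col_label(q) + chr(65 + r)
--
-- def _excel_columns(start='A'):
--     """Internal generator
--
--     Generate excel column: [A, B ... AA, AB ... XFE, XFD]
--     """
--     n = _col_index(start)
--     if n is not None:
--         for i in range(n, 16385):
--             yield _col_label(i)
-- ===== Notes on version B (the rewrite author's own statement) =====
-- stated objective: simpler
-- what changed: Instead of scanning all 26+676+17576 candidate labels with start/break flags threaded through three nested loop blocks, B converts start to its 1-based column number and generates the labels directly for range(n, 16385) via bijective base-26 conversion.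
import Mathlib
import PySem

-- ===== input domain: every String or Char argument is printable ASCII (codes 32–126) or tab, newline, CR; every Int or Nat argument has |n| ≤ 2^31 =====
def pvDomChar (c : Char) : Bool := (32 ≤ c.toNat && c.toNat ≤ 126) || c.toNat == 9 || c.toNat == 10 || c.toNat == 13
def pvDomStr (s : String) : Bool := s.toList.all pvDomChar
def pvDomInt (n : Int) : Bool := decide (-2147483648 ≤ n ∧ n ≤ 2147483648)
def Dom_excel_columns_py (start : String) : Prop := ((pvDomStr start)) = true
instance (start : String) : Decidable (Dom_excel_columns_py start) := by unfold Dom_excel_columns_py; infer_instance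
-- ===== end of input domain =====

-- B replaces A's flag-driven scan of all 26+676+17576 candidate labels by direct
-- generation: convert `start` to its 1-based column number n and emit the labels of
-- n..16384 (bijective base 26).  Equivalence of the RETURN value (list of yields).

-- ===== PORT A =====
-- list(ascii_uppercase); Python's 1-character strings are represented as Chars,
-- '+'-concatenation as List Char append, and each yield as String.ofList of the chars.
def pvAlph : List Char :=
  ['A','B','C','D','E','F','G','H','I','J','K','L','M','N','O','P','Q','R','S','T','U','V','W','X','Y','Z']

def excel_columns_py (start : String) : List String :=
  let s := start.toList
  -- section 1 (start_len == 1); state = (start_check, yields so far)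
  let st1 : Bool × List String :=
    if s.length = 1 then
      pvAlph.foldl (fun st c =>
        let sc := st.1 || decide (s = [c])
        (sc, if sc then st.2 ++ [String.ofList [c]] else st.2)) (false, [])
    else (false, [])
  -- section 2 (start_len == 1 or 2)
  let st2 : Bool × List String :=
    if s.length = 1 ∨ s.length = 2 then
      pvAlph.foldl (fun st c1 =>
        pvAlph.foldl (fun st c2 =>
          let sc := st.1 || decide ([c1, c2] = s)
          (sc, if sc then st.2 ++ [String.ofList [c1, c2]] else st.2)) st) st1
    else st1
  -- section 3; state = (break_check, start_check, yields); the `if st.1 then st`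
  -- tests model Python's `break` (once break_check is set the loops do nothing)
  let st3 : Bool × Bool × List String :=
    pvAlph.foldl (fun st c1 =>
      if st.1 then st else
      pvAlph.foldl (fun st c2 =>
        if st.1 then st else
        pvAlph.foldl (fun st c3 =>
          if st.1 then st
          else if [c1, c2, c3] = ['X','F','E'] then (true, st.2.1, st.2.2)
          else
            let sc := st.2.1 || decide ([c1, c2, c3] = s)
            (false, sc, if sc then st.2.2 ++ [String.ofList [c1, c2, c3]] else st.2.2)) st) st)
      (false, st2.1, st2.2)
  st3.2.2

-- ===== PORT B =====
-- _col_index: early `return None` on a bad character is the `none` branch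
def pvColIndexAux (n : Int) (cs : List Char) : Option Int :=
  match cs with
  | [] => some n
  | c :: rest => if c ∈ pvAlph then pvColIndexAux (n * 26 + ((c.toNat : Int) - 64)) rest else none

def pvColIndex (s : List Char) : Option Int :=
  if 1 ≤ s.length ∧ s.length ≤ 3 then pvColIndexAux 0 s else none

-- _col_label (recursive; divmod(n-1, 26) is PySem floordiv/mod)
def pvColLabel (n : Int) : List Char :=
  if n ≤ 0 then []
  else pvColLabel (PySem.Int.floordiv (n - 1) 26) ++
       [Char.ofNat (65 + (PySem.Int.mod (n - 1) 26)).toNat]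
termination_by n.toNat
decreasing_by
  rw [PySem.Int.floordiv_eq_ediv_of_pos (by norm_num : (0:Int) < 26)]
  omega

def excel_columns_py_alt (start : String) : List String :=
  match pvColIndex start.toList with
  | some n => (PySem.List.pyRange n 16385 1).map (fun i => String.ofList (pvColLabel i))
  | none => []

-- ===== PRECONDITION & SPEC =====
def Spec_excel_columns_py (start : String) (out : List String) : Prop := out = excel_columns_py_alt start
instance (start : String) (out : List String) : Decidable (Spec_excel_columns_py start out) := by unfold Spec_excel_columns_py; infer_instance

-- ===== CLAIM (what is proved, stated in full; the proofs are below) =====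
def Claim_equal_excel_columns_py : Prop := ∀ (start : String), Dom_excel_columns_py start → Spec_excel_columns_py start (excel_columns_py start)

-- ===== LEMMAS AND PROOFS =====

-- proof-side mirror of the label function, on Nat
def pvLabN (n : Nat) : List Char :=
  if n = 0 then []
  else pvLabN ((n - 1) / 26) ++ [Char.ofNat (65 + (n - 1) % 26)]
termination_by n
decreasing_by omega

-- proof-side column number of a char list
def pvIdxN (cs : List Char) : Nat := cs.foldl (fun a c => 26 * a + (c.toNat - 64)) 0

lemma pvLabN_zero : pvLabN 0 = [] := by unfold pvLabN; simp

lemma pvLab_step (a r : Nat) (hr : r < 26) :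
    pvLabN (26 * a + r + 1) = pvLabN a ++ [Char.ofNat (65 + r)] := by
  conv_lhs => rw [pvLabN]
  have h0 : ¬ (26 * a + r + 1 = 0) := by omega
  have hd : (26 * a + r + 1 - 1) / 26 = a := by omega
  have hm : (26 * a + r + 1 - 1) % 26 = r := by omega
  rw [if_neg h0, hd, hm]

lemma toNat_chr (r : Nat) (hr : r < 26) : (Char.ofNat (65 + r)).toNat = 65 + r := by
  rw [Char.toNat_ofNat, if_pos]
  exact Or.inl (by omega)

lemma pvAlph_eq : pvAlph = (List.range 26).map (fun r => Char.ofNat (65 + r)) := by decide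

lemma mem_alph {c : Char} (h : c ∈ pvAlph) : ∃ r, r < 26 ∧ c = Char.ofNat (65 + r) := by
  rw [pvAlph_eq, List.mem_map] at h
  obtain ⟨r, hr, rfl⟩ := h
  exact ⟨r, List.mem_range.mp hr, rfl⟩

lemma alph_toNat {c : Char} (h : c ∈ pvAlph) : 65 ≤ c.toNat ∧ c.toNat ≤ 90 := by
  obtain ⟨r, hr, rfl⟩ := mem_alph h
  rw [toNat_chr r hr]
  omega

lemma chr_mem_alph (r : Nat) (hr : r < 26) : Char.ofNat (65 + r) ∈ pvAlph := by
  rw [pvAlph_eq, List.mem_map]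
  exact ⟨r, List.mem_range.mpr hr, rfl⟩

lemma pvLab_chars : ∀ n, ∀ c ∈ pvLabN n, c ∈ pvAlph := by
  intro n
  induction n using Nat.strong_induction_on with
  | _ n ih =>
    by_cases h0 : n = 0
    · subst h0; rw [pvLabN_zero]; simp
    · obtain ⟨q, r, hr, hn⟩ : ∃ q r, r < 26 ∧ n = 26 * q + r + 1 :=
        ⟨(n - 1) / 26, (n - 1) % 26, by omega, by omega⟩
      subst hn
      rw [pvLab_step _ _ hr]
      intro c hc
      rcases List.mem_append.1 hc with h | h
      · exact ih _ (by omega) c h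
      · simp only [List.mem_singleton] at h
        subst h
        exact chr_mem_alph r hr

lemma pvIdx_snoc (xs : List Char) (c : Char) :
    pvIdxN (xs ++ [c]) = 26 * pvIdxN xs + (c.toNat - 64) := by
  simp [pvIdxN, List.foldl_append]

lemma pvIdx_lab : ∀ n, pvIdxN (pvLabN n) = n := by
  intro n
  induction n using Nat.strong_induction_on with
  | _ n ih =>
    by_cases h0 : n = 0
    · subst h0; rw [pvLabN_zero]; rfl
    · obtain ⟨q, r, hr, hn⟩ : ∃ q r, r < 26 ∧ n = 26 * q + r + 1 :=
        ⟨(n - 1) / 26, (n - 1) % 26, by omega, by omega⟩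
      subst hn
      rw [pvLab_step _ _ hr, pvIdx_snoc, toNat_chr r hr, ih q (by omega)]
      omega

lemma pvLab_inj {m n : Nat} (h : pvLabN m = pvLabN n) : m = n := by
  have hm := pvIdx_lab m
  rw [h, pvIdx_lab] at hm
  omega

lemma pvLab_idx : ∀ cs : List Char, (∀ c ∈ cs, c ∈ pvAlph) → pvLabN (pvIdxN cs) = cs := by
  intro cs
  induction cs using List.reverseRecOn with
  | nil => intro _; rw [show pvIdxN [] = 0 from rfl, pvLabN_zero]
  | append_singleton xs c ih =>
    intro h
    obtain ⟨r, hr, rfl⟩ := mem_alph (h c (by simp))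
    rw [pvIdx_snoc, toNat_chr r hr,
        show 26 * pvIdxN xs + (65 + r - 64) = 26 * pvIdxN xs + r + 1 by omega,
        pvLab_step _ _ hr, ih (fun d hd => h d (List.mem_append_left _ hd))]

lemma pvLab_len1 (m : Nat) (h1 : 1 ≤ m) (h2 : m ≤ 26) : (pvLabN m).length = 1 := by
  obtain ⟨r, hr, hm⟩ : ∃ r, r < 26 ∧ m = 26 * 0 + r + 1 := ⟨m - 1, by omega, by omega⟩
  subst hm
  rw [pvLab_step _ _ hr, pvLabN_zero]
  rfl

lemma pvLab_len2 (m : Nat) (h1 : 27 ≤ m) (h2 : m ≤ 702) : (pvLabN m).length = 2 := by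
  obtain ⟨q, r, hr, hq1, hq2, hm⟩ : ∃ q r, r < 26 ∧ 1 ≤ q ∧ q ≤ 26 ∧ m = 26 * q + r + 1 :=
    ⟨(m - 1) / 26, (m - 1) % 26, by omega, by omega, by omega, by omega⟩
  subst hm
  rw [pvLab_step _ _ hr, List.length_append, pvLab_len1 q hq1 hq2]
  rfl

lemma pvLab_len3 (m : Nat) (h1 : 703 ≤ m) (h2 : m ≤ 18278) : (pvLabN m).length = 3 := by
  obtain ⟨q, r, hr, hq1, hq2, hm⟩ : ∃ q r, r < 26 ∧ 27 ≤ q ∧ q ≤ 702 ∧ m = 26 * q + r + 1 :=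
    ⟨(m - 1) / 26, (m - 1) % 26, by omega, by omega, by omega, by omega⟩
  subst hm
  rw [pvLab_step _ _ hr, List.length_append, pvLab_len2 q hq1 hq2]
  rfl

lemma pvBlock1 (a : Nat) :
    (List.range' (26 * a + 1) 26).map pvLabN = pvAlph.map (fun c => pvLabN a ++ [c]) := by
  rw [List.range'_eq_map_range, List.map_map, pvAlph_eq, List.map_map]
  apply List.map_congr_left
  intro r hr
  rw [List.mem_range] at hr
  simp only [Function.comp]
  rw [show 26 * a + 1 + r = 26 * a + r + 1 by omega, pvLab_step a r hr]

-- the three candidate blocks of A, as label images of ranges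
lemma pvMapLab_block : ∀ (k a : Nat),
    (List.range' (26 * a + 1) (26 * k)).map pvLabN
      = (List.range' a k).flatMap (fun q => pvAlph.map (fun c => pvLabN q ++ [c])) := by
  intro k
  induction k with
  | zero => intro a; simp
  | succ k ih =>
    intro a
    rw [show 26 * (k + 1) = 26 + 26 * k by ring, ← List.range'_append, List.map_append,
        pvBlock1, show 26 * a + 1 + 1 * 26 = 26 * (a + 1) + 1 by ring, ih (a + 1),
        List.range'_succ, List.flatMap_cons]

lemma pvSingles : (List.range' 1 26).map pvLabN = pvAlph.map (fun c => [c]) := by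
  have h := pvMapLab_block 1 0
  norm_num at h
  rw [h]
  simp [pvLabN_zero]

lemma pvPairs : (List.range' 27 676).map pvLabN
    = pvAlph.flatMap (fun c1 => pvAlph.map (fun c2 => [c1, c2])) := by
  have h := pvMapLab_block 26 1
  norm_num at h
  rw [h,
    show (List.range' 1 26).flatMap (fun q => pvAlph.map (fun c => pvLabN q ++ [c]))
      = ((List.range' 1 26).map pvLabN).flatMap (fun p => pvAlph.map (fun c => p ++ [c]))
      from (List.flatMap_map pvLabN (fun p => pvAlph.map (fun c => p ++ [c])) _).symm,
    pvSingles, List.flatMap_map]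
  simp

lemma pvTriples : (List.range' 703 17576).map pvLabN
    = pvAlph.flatMap (fun c1 => pvAlph.flatMap (fun c2 => pvAlph.map (fun c3 => [c1, c2, c3]))) := by
  have h := pvMapLab_block 676 27
  norm_num at h
  rw [h,
    show (List.range' 27 676).flatMap (fun q => pvAlph.map (fun c => pvLabN q ++ [c]))
      = ((List.range' 27 676).map pvLabN).flatMap (fun p => pvAlph.map (fun c => p ++ [c]))
      from (List.flatMap_map pvLabN (fun p => pvAlph.map (fun c => p ++ [c])) _).symm,
    pvPairs, List.flatMap_assoc]
  simp [List.flatMap_map]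

-- generic fold helpers
lemma pvFoldl_ext {σ α : Type} (f g : σ → α → σ) (h : ∀ st a, f st a = g st a) :
    ∀ (l : List α) (st : σ), l.foldl f st = l.foldl g st := by
  intro l
  induction l with
  | nil => intro st; rfl
  | cons a l ih => intro st; rw [List.foldl_cons, List.foldl_cons, h, ih]

lemma pvFoldl_fix {σ α : Type} (F : σ → α → σ) (st : σ) (h : ∀ a, F st a = st) :
    ∀ l : List α, l.foldl F st = st := by
  intro l
  induction l with
  | nil => rfl
  | cons a l ih => rw [List.foldl_cons, h, ih]

lemma pvFoldl_flatMap {α β σ : Type} (f : σ → β → σ) (g : α → List β) :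
    ∀ (l : List α) (s : σ), (l.flatMap g).foldl f s = l.foldl (fun s a => (g a).foldl f s) s := by
  intro l
  induction l with
  | nil => intro s; rfl
  | cons a l ih => intro s; rw [List.flatMap_cons, List.foldl_append, List.foldl_cons, ih]

-- the scan step shared by all three sections of A
def pvScan (s : List Char) (st : Bool × List String) (t : List Char) : Bool × List String :=
  let b := st.1 || decide (t = s)
  (b, if b then st.2 ++ [String.ofList t] else st.2)

lemma pvScan_foldl (s : List Char) : ∀ (cs : List (List Char)) (sc : Bool) (acc : List String),
    cs.foldl (pvScan s) (sc, acc)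
      = (sc || cs.any (fun t => decide (t = s)),
         acc ++ (if sc then cs else cs.dropWhile (fun t => !decide (t = s))).map String.ofList) := by
  intro cs
  induction cs with
  | nil => intro sc acc; simp
  | cons t cs ih =>
    intro sc acc
    rw [List.foldl_cons]
    cases sc with
    | true =>
      rw [show pvScan s (true, acc) t = (true, acc ++ [String.ofList t]) from rfl, ih]
      simp
    | false =>
      by_cases ht : t = s
      · subst ht
        rw [show pvScan t (false, acc) t = (true, acc ++ [String.ofList t]) by simp [pvScan], ih]
        simp
      · rw [show pvScan s (false, acc) t = (false, acc) by simp [pvScan, ht], ih]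
        simp [List.any_cons, ht]

-- section 3's step, with break_check
def pvStep3 (s : List Char) (st : Bool × Bool × List String) (t : List Char) : Bool × Bool × List String :=
  if st.1 then st
  else if t = ['X','F','E'] then (true, st.2.1, st.2.2)
  else
    let b := st.2.1 || decide (t = s)
    (false, b, if b then st.2.2 ++ [String.ofList t] else st.2.2)

lemma pvStep3_noXFE (s : List Char) :
    ∀ (T : List (List Char)), (∀ t ∈ T, t ≠ ['X','F','E']) → ∀ (sc : Bool) (acc : List String),
    T.foldl (pvStep3 s) (false, sc, acc) = (false, T.foldl (pvScan s) (sc, acc)) := by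
  intro T
  induction T with
  | nil => intro _ sc acc; rfl
  | cons t T ih =>
    intro h sc acc
    have hne : ¬ t = ['X','F','E'] := h t (by simp)
    rw [List.foldl_cons, List.foldl_cons,
        show pvStep3 s (false, sc, acc) t = (false, pvScan s (sc, acc) t) by
          simp [pvStep3, pvScan, hne]]
    exact ih (fun u hu => h u (List.mem_cons_of_mem _ hu)) _ _

lemma pvStep3_split (s : List Char) (T1 T2 : List (List Char))
    (h1 : ∀ t ∈ T1, t ≠ ['X','F','E']) (sc : Bool) (acc : List String) :
    (T1 ++ ['X','F','E'] :: T2).foldl (pvStep3 s) (false, sc, acc)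
      = (true, T1.foldl (pvScan s) (sc, acc)) := by
  rw [List.foldl_append, pvStep3_noXFE s T1 h1 sc acc, List.foldl_cons,
      show pvStep3 s (false, T1.foldl (pvScan s) (sc, acc)) ['X','F','E']
        = (true, T1.foldl (pvScan s) (sc, acc)) by simp [pvStep3]]
  exact pvFoldl_fix _ _ (fun t => by simp [pvStep3]) T2

lemma pv_dropWhile_lab : ∀ (k a n : Nat), a ≤ n → n < a + k →
    ((List.range' a k).map pvLabN).dropWhile (fun t => !decide (t = pvLabN n))
      = (List.range' n (a + k - n)).map pvLabN := by
  intro k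
  induction k with
  | zero => intro a n h1 h2; omega
  | succ k ih =>
    intro a n h1 h2
    rw [List.range'_succ, List.map_cons, List.dropWhile_cons]
    by_cases han : a = n
    · subst han
      rw [if_neg (by simp)]
      rw [show a + (k + 1) - a = k + 1 by omega, List.range'_succ, List.map_cons]
    · have hne : pvLabN a ≠ pvLabN n := fun e => han (pvLab_inj e)
      rw [if_pos (by simp [hne])]
      rw [ih (a + 1) n (by omega) (by omega), show a + (k + 1) - n = a + 1 + k - n by omega]

lemma pv_any_mem {s : List Char} {cs : List (List Char)} (h : s ∈ cs) :
    cs.any (fun t => decide (t = s)) = true := by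
  rw [List.any_eq_true]
  exact ⟨s, h, by simp⟩

lemma pv_no_match {s : List Char} {cs : List (List Char)} (h : s ∉ cs) :
    cs.any (fun t => decide (t = s)) = false ∧
    cs.dropWhile (fun t => !decide (t = s)) = [] := by
  constructor
  · rw [List.any_eq_false]
    intro t ht
    simp only [decide_eq_true_eq]
    rintro rfl
    exact h ht
  · rw [List.dropWhile_eq_nil_iff]
    intro t ht
    simp only [Bool.not_eq_true', decide_eq_false_iff_not]
    rintro rfl
    exact h ht

lemma pvRangeGlue (a m b k n : Nat) (h : a + m = b) (h2 : m + k = n) :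
    List.range' a m ++ List.range' b k = List.range' a n := by
  have h3 := @List.range'_append a m k 1
  rw [one_mul, h] at h3
  rw [h3, h2]

-- B-side lemmas
lemma pvLabInt : ∀ n : Nat, pvColLabel (n : Int) = pvLabN n := by
  intro n
  induction n using Nat.strong_induction_on with
  | _ n ih =>
    by_cases h0 : n = 0
    · subst h0
      unfold pvColLabel pvLabN
      norm_num
    · have hpos : ¬ ((n : Int) ≤ 0) := by omega
      unfold pvColLabel
      rw [if_neg hpos, PySem.Int.floordiv_eq_ediv_of_pos (by norm_num : (0:Int) < 26),
          PySem.Int.mod_eq_emod_of_pos (by norm_num : (0:Int) < 26),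
          show ((n : Int) - 1) / 26 = (((n - 1) / 26 : Nat) : Int) by omega,
          ih ((n - 1) / 26) (by omega),
          show (65 + ((n : Int) - 1) % 26).toNat = 65 + (n - 1) % 26 by omega]
      conv_rhs => rw [pvLabN]
      rw [if_neg h0]

lemma pvIdxAux_valid : ∀ (cs : List Char), (∀ c ∈ cs, c ∈ pvAlph) → ∀ a : Nat,
    pvColIndexAux (a : Int) cs = some ((cs.foldl (fun x c => 26 * x + (c.toNat - 64)) a : Nat) : Int) := by
  intro cs
  induction cs with
  | nil => intro _ a; rfl
  | cons c rest ih =>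
    intro h a
    have hc := h c (List.mem_cons_self)
    have hb := alph_toNat hc
    rw [pvColIndexAux, if_pos hc,
        show (a : Int) * 26 + ((c.toNat : Int) - 64) = ((26 * a + (c.toNat - 64) : Nat) : Int) by omega,
        ih (fun d hd => h d (List.mem_cons_of_mem _ hd)) _]
    rfl

lemma pvIdxAux_invalid : ∀ (cs : List Char) (a : Int), (∃ c ∈ cs, c ∉ pvAlph) →
    pvColIndexAux a cs = none := by
  intro cs
  induction cs with
  | nil => intro a h; obtain ⟨c, hc, _⟩ := h; simp at hc
  | cons c rest ih =>
    intro a h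
    by_cases hc : c ∈ pvAlph
    · obtain ⟨d, hd, hnd⟩ := h
      rcases List.mem_cons.1 hd with rfl | hd'
      · exact absurd hc hnd
      · rw [pvColIndexAux, if_pos hc]
        exact ih _ ⟨d, hd', hnd⟩
    · rw [pvColIndexAux, if_neg hc]

lemma pvXFE : pvLabN 16385 = ['X','F','E'] := by
  rw [show (16385 : Nat) = 26 * 630 + 4 + 1 from rfl, pvLab_step 630 4 (by omega),
      show (630 : Nat) = 26 * 24 + 5 + 1 from rfl, pvLab_step 24 5 (by omega),
      show (24 : Nat) = 26 * 0 + 23 + 1 from rfl, pvLab_step 0 23 (by omega),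
      pvLabN_zero]
  decide

-- rewriting A's three sections as pvScan/pvStep3 folds over label lists
lemma sec1_rw (s : List Char) :
    pvAlph.foldl (fun st c =>
        (st.1 || decide (s = [c]),
         if st.1 || decide (s = [c]) then st.2 ++ [String.ofList [c]] else st.2)) (false, ([] : List String))
    = ((List.range' 1 26).map pvLabN).foldl (pvScan s) (false, []) := by
  rw [pvSingles, List.foldl_map]
  exact (pvFoldl_ext _ _ (fun st c => by
    dsimp only [pvScan]
    rw [show decide (s = [c]) = decide ([c] = s) from decide_eq_decide.mpr eq_comm]) pvAlph _).symm

lemma sec2_rw (s : List Char) (st : Bool × List String) :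
    pvAlph.foldl (fun st c1 => pvAlph.foldl (fun st c2 =>
        (st.1 || decide ([c1, c2] = s),
         if st.1 || decide ([c1, c2] = s) then st.2 ++ [String.ofList [c1, c2]] else st.2)) st) st
    = ((List.range' 27 676).map pvLabN).foldl (pvScan s) st := by
  rw [pvPairs, pvFoldl_flatMap]
  apply pvFoldl_ext
  intro st c1
  rw [List.foldl_map]
  rfl

lemma sec3_rw (s : List Char) (st : Bool × Bool × List String) :
    pvAlph.foldl (fun st c1 => if st.1 then st else
      pvAlph.foldl (fun st c2 => if st.1 then st else
        pvAlph.foldl (fun st c3 =>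
          if st.1 then st
          else if [c1, c2, c3] = ['X','F','E'] then (true, st.2.1, st.2.2)
          else
            (false, st.2.1 || decide ([c1, c2, c3] = s),
             if st.2.1 || decide ([c1, c2, c3] = s) then st.2.2 ++ [String.ofList [c1, c2, c3]]
             else st.2.2)) st) st) st
    = ((List.range' 703 17576).map pvLabN).foldl (pvStep3 s) st := by
  rw [pvTriples, pvFoldl_flatMap]
  apply pvFoldl_ext
  intro st c1
  rw [pvFoldl_flatMap]
  by_cases h1 : st.1
  · rw [if_pos h1]
    symm
    apply pvFoldl_fix
    intro c2
    apply pvFoldl_fix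
    intro t
    simp [pvStep3, h1]
  · rw [if_neg h1]
    apply pvFoldl_ext
    intro st c2
    by_cases h2 : st.1
    · rw [if_pos h2]
      symm
      apply pvFoldl_fix
      intro t
      simp [pvStep3, h2]
    · rw [if_neg h2, List.foldl_map]
      rfl

-- evaluated forms of the scan fold
lemma pvScanTrue (s : List Char) (cs : List (List Char)) (acc : List String) :
    cs.foldl (pvScan s) (true, acc) = (true, acc ++ cs.map String.ofList) := by
  rw [pvScan_foldl]
  simp

lemma pvScanNoMatch (s : List Char) (cs : List (List Char)) (h : s ∉ cs) (acc : List String) :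
    cs.foldl (pvScan s) (false, acc) = (false, acc) := by
  rw [pvScan_foldl, (pv_no_match h).1, (pv_no_match h).2]
  simp

lemma pvScanRange (s : List Char) (n a k : Nat) (hsl : pvLabN n = s) (h1 : a ≤ n)
    (h2 : n < a + k) (acc : List String) :
    ((List.range' a k).map pvLabN).foldl (pvScan s) (false, acc)
      = (true, acc ++ ((List.range' n (a + k - n)).map pvLabN).map String.ofList) := by
  subst hsl
  rw [pvScan_foldl,
      pv_any_mem (List.mem_map.mpr ⟨n, List.mem_range'_1.mpr ⟨h1, h2⟩, rfl⟩),
      pv_dropWhile_lab k a n h1 h2]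
  simp

-- the section-3 fold: stops right before XFE = label 16385
lemma pvSec3_eval (s : List Char) (sc : Bool) (acc : List String) :
    ((List.range' 703 17576).map pvLabN).foldl (pvStep3 s) (false, sc, acc)
      = (true, ((List.range' 703 15682).map pvLabN).foldl (pvScan s) (sc, acc)) := by
  have e1 : List.range' 16385 1894 = 16385 :: List.range' 16386 1893 := by
    rw [show (1894 : Nat) = 1893 + 1 from rfl, List.range'_succ]
  have hsplit : (List.range' 703 17576).map pvLabN
      = (List.range' 703 15682).map pvLabN ++ ['X','F','E'] :: (List.range' 16386 1893).map pvLabN := by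
    rw [← pvRangeGlue 703 15682 16385 1894 17576 (by norm_num) (by norm_num), e1,
        List.map_append, List.map_cons, pvXFE]
  rw [hsplit, pvStep3_split]
  intro t ht
  obtain ⟨m, hm, rfl⟩ := List.mem_map.1 ht
  rw [List.mem_range'_1] at hm
  intro heq
  rw [← pvXFE] at heq
  have := pvLab_inj heq
  omega

-- membership refutations
lemma pvNotMemInvalid {s : List Char} (h : ¬ ∀ c ∈ s, c ∈ pvAlph) (a k : Nat) :
    s ∉ (List.range' a k).map pvLabN := by
  intro hmem
  obtain ⟨m, _, rfl⟩ := List.mem_map.1 hmem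
  exact h (pvLab_chars m)

lemma pvNotMemT1Len {s : List Char} (h : s.length ≠ 3) :
    s ∉ (List.range' 703 15682).map pvLabN := by
  intro hmem
  obtain ⟨m, hm, rfl⟩ := List.mem_map.1 hmem
  rw [List.mem_range'_1] at hm
  exact h (pvLab_len3 m (by omega) (by omega))

lemma pvNotMemT1Big (n : Nat) (h : 16385 ≤ n) :
    pvLabN n ∉ (List.range' 703 15682).map pvLabN := by
  intro hmem
  obtain ⟨m, hm, he⟩ := List.mem_map.1 hmem
  rw [List.mem_range'_1] at hm
  have := pvLab_inj he
  omega

-- B's yield list, for a valid start with column number n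
lemma pvB_list (n : Nat) :
    (PySem.List.pyRange (n : Int) 16385 1).map (fun i => String.ofList (pvColLabel i))
      = ((List.range' n (16385 - n)).map pvLabN).map String.ofList := by
  rw [PySem.List.pyRange_one, List.map_map,
      show ((16385 : Int) - (n : Int)).toNat = 16385 - n by omega,
      List.range'_eq_map_range, List.map_map, List.map_map]
  apply List.map_congr_left
  intro k _
  simp only [Function.comp]
  rw [show ((n : Int) + (k : Int)) = ((n + k : Nat) : Int) by push_cast; ring, pvLabInt]

-- ===== VERDICT (by name: the statement is the Claim_ definition above) =====
theorem excel_columns_py_spec : Claim_equal_excel_columns_py := by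
  intro start _
  unfold Spec_excel_columns_py excel_columns_py excel_columns_py_alt pvColIndex
  dsimp only
  set s := start.toList with hs
  by_cases hv : ∀ c ∈ s, c ∈ pvAlph
  · -- every character is an uppercase letter
    have hval : pvColIndexAux 0 s = some ((pvIdxN s : Nat) : Int) := by
      have h := pvIdxAux_valid s hv 0
      rw [Nat.cast_zero] at h
      exact h
    have hsl : pvLabN (pvIdxN s) = s := pvLab_idx s hv
    by_cases hL1 : s.length = 1
    · obtain ⟨c, hc⟩ := List.length_eq_one_iff.1 hL1
      have hb := alph_toNat (hv c (by rw [hc]; simp))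
      have hn : pvIdxN s = c.toNat - 64 := by rw [hc]; simp [pvIdxN]
      rw [if_pos hL1, if_pos (Or.inl hL1), sec1_rw,
          pvScanRange s (pvIdxN s) 1 26 hsl (by omega) (by omega) [],
          sec2_rw, pvScanTrue]
      dsimp only
      rw [sec3_rw, pvSec3_eval, pvScanTrue]
      dsimp only
      rw [if_pos (show 1 ≤ s.length ∧ s.length ≤ 3 by omega), hval]
      dsimp only
      rw [pvB_list (pvIdxN s)]
      simp only [List.nil_append, List.append_assoc, List.map_map, ← List.map_append]
      rw [pvRangeGlue 27 676 703 15682 16358 (by norm_num) (by norm_num),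
          pvRangeGlue (pvIdxN s) (1 + 26 - pvIdxN s) 27 16358 (16385 - pvIdxN s)
            (by omega) (by omega)]
    · by_cases hL2 : s.length = 2
      · obtain ⟨c, d, hcd⟩ := List.length_eq_two.1 hL2
        have hbc := alph_toNat (hv c (by rw [hcd]; simp))
        have hbd := alph_toNat (hv d (by rw [hcd]; simp))
        have hn : pvIdxN s = 26 * (c.toNat - 64) + (d.toNat - 64) := by
          rw [hcd]; simp [pvIdxN]; try omega
        rw [if_neg hL1, if_pos (Or.inr hL2), sec2_rw,
            pvScanRange s (pvIdxN s) 27 676 hsl (by omega) (by omega) []]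
        dsimp only
        rw [sec3_rw, pvSec3_eval, pvScanTrue]
        dsimp only
        rw [if_pos (show 1 ≤ s.length ∧ s.length ≤ 3 by omega), hval]
        dsimp only
        rw [pvB_list (pvIdxN s)]
        simp only [List.nil_append, List.map_map, ← List.map_append]
        rw [pvRangeGlue (pvIdxN s) (27 + 676 - pvIdxN s) 703 15682 (16385 - pvIdxN s)
              (by omega) (by omega)]
      · by_cases hL3 : s.length = 3
        · obtain ⟨c, d, e, hcde⟩ := List.length_eq_three.1 hL3
          have hbc := alph_toNat (hv c (by rw [hcde]; simp))
          have hbd := alph_toNat (hv d (by rw [hcde]; simp))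
          have hbe := alph_toNat (hv e (by rw [hcde]; simp))
          have hn : pvIdxN s = 26 * (26 * (c.toNat - 64) + (d.toNat - 64)) + (e.toNat - 64) := by
            rw [hcde]; simp [pvIdxN]; try omega
          rw [if_neg hL1, if_neg (by omega : ¬ (s.length = 1 ∨ s.length = 2)), sec3_rw, pvSec3_eval]
          by_cases h16 : pvIdxN s ≤ 16384
          · rw [pvScanRange s (pvIdxN s) 703 15682 hsl (by omega) (by omega) []]
            dsimp only
            rw [if_pos (show 1 ≤ s.length ∧ s.length ≤ 3 by omega), hval]
            dsimp only
            rw [pvB_list (pvIdxN s),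
                show 703 + 15682 - pvIdxN s = 16385 - pvIdxN s by omega]
            simp only [List.nil_append, List.map_map]
          · rw [pvScanNoMatch s _ (by rw [← hsl]; exact pvNotMemT1Big (pvIdxN s) (by omega)) []]
            dsimp only
            rw [if_pos (show 1 ≤ s.length ∧ s.length ≤ 3 by omega), hval]
            dsimp only
            rw [pvB_list (pvIdxN s), show 16385 - pvIdxN s = 0 by omega]
            rfl
        · -- valid characters but length not 1, 2 or 3: nothing matches, both yield []
          rw [if_neg hL1, if_neg (by omega : ¬ (s.length = 1 ∨ s.length = 2)), sec3_rw, pvSec3_eval,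
              pvScanNoMatch s _ (pvNotMemT1Len hL3) []]
          dsimp only
          rw [if_neg (by omega : ¬ (1 ≤ s.length ∧ s.length ≤ 3))]
  · -- some character is not an uppercase letter: nothing matches, both yield []
    have h1 : s ∉ (List.range' 1 26).map pvLabN := pvNotMemInvalid hv 1 26
    have h2 : s ∉ (List.range' 27 676).map pvLabN := pvNotMemInvalid hv 27 676
    have h3 : s ∉ (List.range' 703 15682).map pvLabN := pvNotMemInvalid hv 703 15682
    have hB : pvColIndexAux 0 s = none := by
      exact pvIdxAux_invalid _ _ (by simpa using hv)
    have hst1 : (if s.length = 1 then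
        pvAlph.foldl (fun st c =>
          (st.1 || decide (s = [c]),
           if st.1 || decide (s = [c]) then st.2 ++ [String.ofList [c]] else st.2)) (false, [])
      else ((false, []) : Bool × List String)) = (false, []) := by
      by_cases hL1 : s.length = 1
      · rw [if_pos hL1, sec1_rw, pvScanNoMatch s _ h1 []]
      · rw [if_neg hL1]
    rw [hst1]
    have hst2 : (if s.length = 1 ∨ s.length = 2 then
        pvAlph.foldl (fun st c1 => pvAlph.foldl (fun st c2 =>
          (st.1 || decide ([c1, c2] = s),
           if st.1 || decide ([c1, c2] = s) then st.2 ++ [String.ofList [c1, c2]] else st.2)) st) ((false, []) : Bool × List String)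
      else ((false, []) : Bool × List String)) = (false, []) := by
      by_cases hor : s.length = 1 ∨ s.length = 2
      · rw [if_pos hor, sec2_rw, pvScanNoMatch s _ h2 []]
      · rw [if_neg hor]
    rw [hst2]
    dsimp only
    rw [sec3_rw, pvSec3_eval, pvScanNoMatch s _ h3 []]
    dsimp only
    by_cases hlen : 1 ≤ s.length ∧ s.length ≤ 3
    · rw [if_pos hlen, hB]
    · rw [if_neg hlen]
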